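-- pv_equiv track=rewrite | github.com/ShakChunni/CSE_lab | CSE111/Assignment4/hard2.py | goat
-- ===== SOURCE A (Python) =====
-- def goat(n):
--     string1=string2=string_match=""
--     for i in range(len(n)//3):
--         string1+=n[i]
--         string2+=n[-(i+1)]
--         if string1==string2[::-1]:
--             string_match=string1
--     if string_match in n[len(string1):len(n)-len(string1)]:
--         palindrome_string=string_match
--     else:
--         palindrome_string="Not a palindrome substring"
--     return(palindrome_string)
-- ===== SOURCE B (Python) =====
-- def goat(n):
--     L = len(n)
--     k = L // 3
--     m = next((j for j in range(k, 0, -1) if n[:j] == n[L - j:]), 0)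
--     s = n[:m]
--     return s if s in n[k:L - k] else "Not a palindrome substring"
-- ===== Notes on version B (the rewrite author's own statement) =====
-- stated objective: simpler
-- what changed: B replaces A's incremental character-by-character building of prefix/reversed-suffix strings (comparing the pair at every length and remembering the last match) by a single descending search for the first (= longest) length j <= len//3 whose prefix slice equals its suffix slice, then one substring test.
import Mathlib
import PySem

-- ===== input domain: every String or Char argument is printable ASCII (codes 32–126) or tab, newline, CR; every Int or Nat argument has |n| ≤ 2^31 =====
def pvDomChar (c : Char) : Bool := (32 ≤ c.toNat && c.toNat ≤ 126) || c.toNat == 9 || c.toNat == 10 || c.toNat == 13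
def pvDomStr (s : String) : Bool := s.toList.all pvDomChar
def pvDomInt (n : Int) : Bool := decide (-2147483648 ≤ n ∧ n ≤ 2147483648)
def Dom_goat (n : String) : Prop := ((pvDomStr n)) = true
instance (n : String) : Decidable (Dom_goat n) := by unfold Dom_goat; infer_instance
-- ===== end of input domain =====

-- B replaces A's incremental building of prefix/reversed-suffix strings by one descending
-- search for the longest length whose prefix slice equals its suffix slice (simpler; same worst-case cost).

-- ===== PORT A =====
-- loop state: (string1, string2, string_match); n[i] and n[-(i+1)] are always in range here,
-- so pyGet? is some and '.toList' appends exactly that character; s2[::-1] is s2.reverse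
-- (PySem.List.slice?_none_none_neg_one).
def goat (n : String) : String :=
  let cs := n.toList
  let st := (PySem.List.pyRange 0 (PySem.Int.floordiv (cs.length : Int) 3) 1).foldl
    (fun (st : List Char × List Char × List Char) i =>
      let s1 := st.1 ++ (PySem.List.pyGet? cs i).toList
      let s2 := st.2.1 ++ (PySem.List.pyGet? cs (-(i+1))).toList
      let sm := if s1 = s2.reverse then s1 else st.2.2
      (s1, s2, sm)) ([], [], [])
  if PySem.Chars.isIn st.2.2
      (PySem.List.slice cs (some (st.1.length : Int)) (some ((cs.length : Int) - st.1.length)))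
  then String.ofList st.2.2 else "Not a palindrome substring"

-- ===== PORT B =====
-- m = next((j for j in range(k, 0, -1) if n[:j] == n[L-j:]), 0); then one substring test.
def goat_alt (n : String) : String :=
  let cs := n.toList
  let L : Int := cs.length
  let k : Int := PySem.Int.floordiv L 3
  let m : Int := ((PySem.List.pyRange k 0 (-1)).find? (fun j =>
      PySem.List.slice cs none (some j) == PySem.List.slice cs (some (L - j)) none)).getD 0
  let s := PySem.List.slice cs none (some m)
  if PySem.Chars.isIn s (PySem.List.slice cs (some k) (some (L - k)))
  then String.ofList s else "Not a palindrome substring"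

-- ===== PRECONDITION & SPEC =====
def Spec_goat (n : String) (out : String) : Prop := out = goat_alt n
instance (n : String) (out : String) : Decidable (Spec_goat n out) := by unfold Spec_goat; infer_instance

-- ===== CLAIM (what is proved, stated in full; the proofs are below) =====
def Claim_equal_goat : Prop := ∀ (n : String), Dom_goat n → Spec_goat n (goat n)

-- ===== LEMMAS AND PROOFS =====

-- the longest m ≤ k with prefix of length m equal to the suffix of length m (0 if none)
def maxB (cs : List Char) : Nat → Nat
  | 0 => 0
  | k+1 => if cs.take (k+1) = cs.drop (cs.length - (k+1)) then k+1 else maxB cs k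

theorem floordiv_natCast_three (n : Nat) :
    PySem.Int.floordiv (n : Int) 3 = ((n / 3 : Nat) : Int) := by
  simp [PySem.Int.floordiv, Int.fdiv_eq_ediv]

-- A's loop after k iterations: string1 = first k chars, string2 = reversed last k chars,
-- string_match = the longest matching prefix/suffix of length ≤ k
theorem loopA (cs : List Char) (k : Nat) (hk : k ≤ cs.length) :
    (PySem.List.pyRange 0 (k : Int) 1).foldl
      (fun (st : List Char × List Char × List Char) i =>
        let s1 := st.1 ++ (PySem.List.pyGet? cs i).toList
        let s2 := st.2.1 ++ (PySem.List.pyGet? cs (-(i+1))).toList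
        let sm := if s1 = s2.reverse then s1 else st.2.2
        (s1, s2, sm)) ([], [], [])
    = (cs.take k, (cs.drop (cs.length - k)).reverse, cs.take (maxB cs k)) := by
  induction k with
  | zero => simp [PySem.List.pyRange_one_eq_nil, maxB]
  | succ k ih =>
    have hk' : k ≤ cs.length := Nat.le_of_succ_le hk
    have hklt : k < cs.length := hk
    have hlt2 : cs.length - (k+1) < cs.length := by omega
    rw [show ((k+1 : Nat) : Int) = (k : Int) + 1 by push_cast; ring,
        PySem.List.pyRange_one_succ_right (by positivity),
        List.foldl_append, ih hk']
    simp only [List.foldl_cons, List.foldl_nil]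
    have h1 : PySem.List.pyGet? cs (k : Int) = some cs[k] := by
      simp [PySem.List.pyGet?_natCast, List.getElem?_eq_getElem hklt]
    have h2 : PySem.List.pyGet? cs (-((k:Int)+1)) = some cs[cs.length - (k+1)] := by
      rw [show -((k:Int)+1) = -(((k+1:Nat)) : Int) by push_cast; ring,
          PySem.List.pyGet?_neg_natCast _ _ (by omega) (by omega)]
      exact List.getElem?_eq_getElem hlt2
    have ht1 : cs.take k ++ [cs[k]] = cs.take (k+1) := by
      rw [List.take_add_one, List.getElem?_eq_getElem hklt]; rfl
    have ht2 : (cs.drop (cs.length - k)).reverse ++ [cs[cs.length - (k+1)]]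
        = (cs.drop (cs.length - (k+1))).reverse := by
      rw [List.drop_eq_getElem_cons hlt2, List.reverse_cons,
          show cs.length - (k+1) + 1 = cs.length - k by omega]
    simp only [h1, h2, Option.toList_some, ht1, ht2]
    have hrr : ((cs.drop (cs.length - (k+1))).reverse).reverse = cs.drop (cs.length - (k+1)) :=
      List.reverse_reverse _
    rw [maxB, hrr]
    split_ifs with h <;> rfl

-- B's descending search finds exactly that longest length (0 if none)
theorem findB (cs : List Char) (k : Nat) (hk : k ≤ cs.length) :
    (((PySem.List.pyRange (k : Int) 0 (-1)).find? (fun j =>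
        PySem.List.slice cs none (some j)
          == PySem.List.slice cs (some ((cs.length : Int) - j)) none)).getD 0)
    = ((maxB cs k : Nat) : Int) := by
  induction k with
  | zero => simp [PySem.List.pyRange_neg_one_eq_nil, maxB]
  | succ k ih =>
    rw [show ((k+1 : Nat) : Int) = (k : Int) + 1 by push_cast; ring,
        PySem.List.pyRange_neg_one_cons (by positivity)]
    have hp : (PySem.List.slice cs none (some ((k:Int)+1))
          == PySem.List.slice cs (some ((cs.length : Int) - ((k:Int)+1))) none)
        = (cs.take (k+1) == cs.drop (cs.length - (k+1))) := by
      rw [show ((k:Int)+1) = (((k+1:Nat)) : Int) by push_cast; ring,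
          show ((cs.length : Int) - ((k+1:Nat):Int)) = (((cs.length - (k+1) : Nat)) : Int) by omega,
          PySem.List.slice_to_natCast, PySem.List.slice_from_natCast]
    rw [List.find?_cons, hp, maxB]
    by_cases h : cs.take (k+1) = cs.drop (cs.length - (k+1))
    · simp [h]
    · have hb : (cs.take (k+1) == cs.drop (cs.length - (k+1))) = false := by simp [h]
      rw [hb, if_neg h, show ((k:Int)+1-1) = (k:Int) by ring]
      exact ih (by omega)

-- ===== VERDICT (by name: the statement is the Claim_ definition above) =====
theorem goat_spec : Claim_equal_goat := by
  intro n _hdom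
  unfold Spec_goat goat goat_alt
  simp only [floordiv_natCast_three]
  have hK : n.toList.length / 3 ≤ n.toList.length := Nat.div_le_self _ _
  rw [loopA n.toList _ hK, findB n.toList _ hK]
  simp only [List.length_take, Nat.min_eq_left hK, PySem.List.slice_to_natCast]
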